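-- pv_equiv track=rewrite | github.com/nus-mtp/another-cs-study-planner | test/test_queries.py | is_table_sorted_by_first_elem
-- ===== SOURCE A (Python) =====
-- def is_table_sorted_by_first_elem(table_to_test):
--     '''
--         Tests if the rows in table_to_test is sorted in ascending order
--         according to the first element in each row.
--         Table must contain at least one row.
--         Returns true if so, false otherwise.
--     '''
--     FIRST_ELEMENT_INDEX = 0
--     previous_element = table_to_test[0][FIRST_ELEMENT_INDEX]
--
--     for row in range(1, len(table_to_test)):
--         current_element = table_to_test[row][FIRST_ELEMENT_INDEX]
--         if current_element < previous_element:
--             return False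
--         else:
--             previous_element = current_element
--
--     return True
-- ===== SOURCE B (Python) =====
-- def is_table_sorted_by_first_elem(table_to_test):
--     '''Sort-and-compare: the first-column values equal their sorted copy
--        exactly when the table is sorted by first element.'''
--     firsts = [row[0] for row in table_to_test]
--     return firsts == sorted(firsts)
-- ===== Notes on version B (the rewrite author's own statement) =====
-- stated objective: simpler
-- what changed: Replaces the explicit index loop with early return by extracting the first column and comparing it with its sorted copy.
-- outside the precondition, e.g. on is_table_sorted_by_first_elem([]): A raises IndexError, B returns True; on is_table_sorted_by_first_elem([[3109, 1], [2], []]): A returns False, B raises IndexError; on is_table_sorted_by_first_elem([[1], []]): A raises IndexError, B raises IndexError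
import Mathlib
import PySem

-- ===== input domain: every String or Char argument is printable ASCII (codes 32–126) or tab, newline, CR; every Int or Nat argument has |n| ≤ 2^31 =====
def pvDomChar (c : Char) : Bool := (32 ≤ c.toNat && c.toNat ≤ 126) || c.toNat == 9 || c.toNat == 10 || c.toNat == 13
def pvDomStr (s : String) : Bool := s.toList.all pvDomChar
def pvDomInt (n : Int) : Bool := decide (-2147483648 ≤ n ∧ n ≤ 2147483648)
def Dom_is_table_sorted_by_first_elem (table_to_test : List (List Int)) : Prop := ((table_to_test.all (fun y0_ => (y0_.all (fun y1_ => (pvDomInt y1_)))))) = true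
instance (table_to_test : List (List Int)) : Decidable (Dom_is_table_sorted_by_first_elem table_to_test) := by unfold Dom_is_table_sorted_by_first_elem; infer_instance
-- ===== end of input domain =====

-- B replaces A's index loop with 'first column equals its sorted copy' (simpler, sort-and-compare).

-- ===== PORT A =====
-- A's for-loop over range(1, len) reading table_to_test[row][0] with early 'return False',
-- transcribed as structural recursion over the remaining rows carrying previous_element.
def pvALoop (previous_element : Int) (rows : List (List Int)) : Bool :=
  match rows with
  | [] => true
  | row :: rest =>
    match PySem.List.pyGet? row 0 with
    | none => false      -- IndexError on an empty row: outside Pre_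
    | some current_element =>
      if current_element < previous_element then false else pvALoop current_element rest

def is_table_sorted_by_first_elem (table_to_test : List (List Int)) : Bool :=
  match PySem.List.pyGet? table_to_test 0 with
  | none => false        -- IndexError on empty table: outside Pre_
  | some first_row =>
    match PySem.List.pyGet? first_row 0 with
    | none => false      -- IndexError on empty first row: outside Pre_
    | some previous_element => pvALoop previous_element table_to_test.tail

-- ===== PORT B =====
-- firsts = [row[0] for row in table_to_test]; return firsts == sorted(firsts)
def is_table_sorted_by_first_elem_alt (table_to_test : List (List Int)) : Bool :=
  let firsts := table_to_test.map (fun row => (PySem.List.pyGet? row 0).getD 0)  -- row[0]; getD unreachable under Pre_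
  firsts == PySem.List.sorted firsts (fun x => x) false

-- ===== PRECONDITION & SPEC =====
-- Pre_ excludes the empty table (A raises IndexError reading table_to_test[0][0]) and tables
-- containing an empty row, on which A either raises IndexError or returns False only by
-- short-circuiting before the empty row while B's comprehension raises there.
def Pre_is_table_sorted_by_first_elem (table_to_test : List (List Int)) : Prop :=
  table_to_test ≠ [] ∧ ∀ row ∈ table_to_test, row ≠ []
instance (table_to_test : List (List Int)) : Decidable (Pre_is_table_sorted_by_first_elem table_to_test) := by unfold Pre_is_table_sorted_by_first_elem; infer_instance

def pvWitness_is_table_sorted_by_first_elem : List (List Int) := [[1, 9], [2], [2, 0]]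

def Spec_is_table_sorted_by_first_elem (table_to_test : List (List Int)) (out : Bool) : Prop := out = is_table_sorted_by_first_elem_alt table_to_test
instance (table_to_test : List (List Int)) (out : Bool) : Decidable (Spec_is_table_sorted_by_first_elem table_to_test out) := by unfold Spec_is_table_sorted_by_first_elem; infer_instance

-- ===== CLAIM (what is proved, stated in full; the proofs are below) =====
def Claim_equal_is_table_sorted_by_first_elem : Prop := ∀ (table_to_test : List (List Int)), Dom_is_table_sorted_by_first_elem table_to_test → Pre_is_table_sorted_by_first_elem table_to_test → Spec_is_table_sorted_by_first_elem table_to_test (is_table_sorted_by_first_elem table_to_test)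


-- ===== LEMMAS AND PROOFS =====

-- row[0] of a non-empty row
theorem pvGet0_cons {α : Type} (x : α) (xs : List α) :
    PySem.List.pyGet? (x :: xs) 0 = some x := by
  simp [PySem.List.pyGet?, PySem.List.pyIdx?]

-- the first-column value B extracts from a non-empty row
theorem pvFirst_of_ne_nil (row : List Int) (h : row ≠ []) :
    (PySem.List.pyGet? row 0).getD 0 = row.headD 0 := by
  cases row with
  | nil => exact absurd rfl h
  | cons x xs => rw [pvGet0_cons]; rfl

-- A's loop decides the ≤-chain condition on prev :: first-column values
theorem pvALoop_chain (previous_element : Int) (rows : List (List Int))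
    (h : ∀ row ∈ rows, row ≠ []) :
    pvALoop previous_element rows
      = decide (List.IsChain (· ≤ ·) (previous_element :: rows.map (fun row => row.headD 0))) := by
  induction rows generalizing previous_element with
  | nil => simp [pvALoop]
  | cons row rest ih =>
    have hrow : row ≠ [] := h row (List.mem_cons_self ..)
    obtain ⟨x, xs, rfl⟩ : ∃ x xs, row = x :: xs := by
      cases row with
      | nil => exact absurd rfl hrow
      | cons x xs => exact ⟨x, xs, rfl⟩
    have hrest : ∀ r ∈ rest, r ≠ [] := fun r hr => h r (List.mem_cons_of_mem _ hr)
    by_cases hlt : x < previous_element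
    · simp [pvALoop, hlt, List.isChain_cons_cons]
    · simp only [pvALoop, pvGet0_cons, hlt, if_false, ih x hrest,
        List.map_cons, List.headD_cons, List.isChain_cons_cons]
      rw [Bool.eq_iff_iff]
      simp only [decide_eq_true_iff]
      constructor
      · exact fun hc => ⟨by omega, hc⟩
      · exact fun hc => hc.2

-- a list equals its sorted copy iff it is ≤-pairwise
theorem pvSorted_eq_iff (xs : List Int) :
    (xs = PySem.List.sorted xs (fun x => x) false) ↔ List.Pairwise (· ≤ ·) xs := by
  constructor
  · intro h
    have := PySem.List.sorted_pairwise (xs := xs) (key := fun x => x)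
    rw [← h] at this
    exact this
  · intro h
    exact (PySem.List.sorted_eq_self_of_pairwise _ _ h).symm

-- ===== VERDICT (by name: the statement is the Claim_ definition above) =====
theorem is_table_sorted_by_first_elem_spec : Claim_equal_is_table_sorted_by_first_elem := by
  intro t _ hpre
  obtain ⟨hne, hrows⟩ := hpre
  obtain ⟨r0, rest, rfl⟩ : ∃ r0 rest, t = r0 :: rest := by
    cases t with
    | nil => exact absurd rfl hne
    | cons r0 rest => exact ⟨r0, rest, rfl⟩
  have hr0 : r0 ≠ [] := hrows r0 (List.mem_cons_self ..)
  obtain ⟨x, xs, rfl⟩ : ∃ x xs, r0 = x :: xs := by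
    cases r0 with
    | nil => exact absurd rfl hr0
    | cons x xs => exact ⟨x, xs, rfl⟩
  have hrest : ∀ r ∈ rest, r ≠ [] := fun r hr => hrows r (List.mem_cons_of_mem _ hr)
  show is_table_sorted_by_first_elem _ = is_table_sorted_by_first_elem_alt _
  have hmap : rest.map (fun row => (PySem.List.pyGet? row 0).getD 0)
      = rest.map (fun row => row.headD 0) :=
    List.map_congr_left (fun r hr => pvFirst_of_ne_nil r (hrest r hr))
  simp only [is_table_sorted_by_first_elem, is_table_sorted_by_first_elem_alt,
    pvGet0_cons, List.tail_cons, List.map_cons, Option.getD_some, hmap]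
  rw [pvALoop_chain x rest hrest]
  have hiff : List.IsChain (· ≤ ·) (x :: rest.map (fun row => row.headD 0))
      ↔ (x :: rest.map (fun row => row.headD 0))
        = PySem.List.sorted (x :: rest.map (fun row => row.headD 0)) (fun x => x) false := by
    rw [List.isChain_iff_pairwise, ← pvSorted_eq_iff]
  rw [Bool.eq_iff_iff]
  simp only [decide_eq_true_iff, beq_iff_eq, hiff]
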